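-- pv_equiv track=rewrite | github.com/linkin-parks-bassist/davids-universal-number-kounter | utils/dunkasm/scripts/extract_instr.py | expanded_length
-- ===== SOURCE A (Python) =====
-- TAB_WIDTH = 4
--
-- def expanded_length(s: str, tab_width: int = TAB_WIDTH) -> int:
-- 	"""Compute the visual width of a string assuming tab expansion."""
-- 	col = 0
-- 	for ch in s:
-- 		if ch == '\t':
-- 			col += tab_width - (col % tab_width)
-- 		else:
-- 			col += 1
-- 	return col
-- ===== SOURCE B (Python) =====
-- TAB_WIDTH = 4
--
-- def expanded_length(s: str, tab_width: int = TAB_WIDTH) -> int: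
--     """Compute the visual width of a string assuming tab expansion."""
--     segments = s.split('\t')
--     col = len(segments[0])
--     for seg in segments[1:]:
--         col += tab_width - (col % tab_width)
--         col += len(seg)
--     return col
-- ===== Notes on version B (the rewrite author's own statement) =====
-- stated objective: faster
-- what changed: B splits the string on tabs once and processes whole non-tab runs at a time (col advances by the run length, tabs become explicit jumps to the next tab stop), instead of A's per-character loop that branches on every character.
import Mathlib
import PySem

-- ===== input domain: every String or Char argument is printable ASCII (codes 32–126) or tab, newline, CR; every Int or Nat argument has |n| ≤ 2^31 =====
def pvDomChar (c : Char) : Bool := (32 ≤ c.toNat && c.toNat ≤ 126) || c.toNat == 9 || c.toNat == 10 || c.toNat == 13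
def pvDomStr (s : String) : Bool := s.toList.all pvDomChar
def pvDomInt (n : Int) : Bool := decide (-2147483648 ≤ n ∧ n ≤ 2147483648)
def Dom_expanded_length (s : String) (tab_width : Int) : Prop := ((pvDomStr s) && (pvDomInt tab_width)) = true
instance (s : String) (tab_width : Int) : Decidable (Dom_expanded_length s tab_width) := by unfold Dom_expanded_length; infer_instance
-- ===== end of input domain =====

-- B computes the width by splitting on tabs once and advancing over whole non-tab runs,
-- instead of A's per-character branch loop (alternative decomposition, same O(n) cost).


-- ===== PORT A =====
-- for ch in s: if ch == '\t': col += tab_width - (col % tab_width) else: col += 1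
def expanded_length (s : String) (tab_width : Int) : Int :=
  s.toList.foldl
    (fun col ch =>
      if ch = '\t' then col + (tab_width - PySem.Int.mod col tab_width)
      else col + 1)
    0

-- ===== PORT B =====
-- s.split('\t') as (first segment, remaining segments); faithful to Python str.split with a one-char sep
def pvSplitTab : List Char → List Char × List (List Char)
  | [] => ([], [])
  | c :: cs =>
    let r := pvSplitTab cs
    if c = '\t' then ([], r.1 :: r.2) else (c :: r.1, r.2)

def expanded_length_alt (s : String) (tab_width : Int) : Int :=
  let segs := pvSplitTab s.toList
  segs.2.foldl
    (fun col seg => col + (tab_width - PySem.Int.mod col tab_width) + (seg.length : Int))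
    (segs.1.length : Int)

-- ===== PRECONDITION & SPEC =====
-- Pre_ excludes exactly the inputs where Python A raises ZeroDivisionError: tab_width = 0 with a tab in s.
def Pre_expanded_length (s : String) (tab_width : Int) : Prop :=
  tab_width ≠ 0 ∨ '\t' ∉ s.toList
instance (s : String) (tab_width : Int) : Decidable (Pre_expanded_length s tab_width) := by
  unfold Pre_expanded_length; infer_instance
def pvWitness_expanded_length : String × Int := ("a\tbc", 4)

def Spec_expanded_length (s : String) (tab_width : Int) (out : Int) : Prop := out = expanded_length_alt s tab_width
instance (s : String) (tab_width : Int) (out : Int) : Decidable (Spec_expanded_length s tab_width out) := by unfold Spec_expanded_length; infer_instance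

-- ===== CLAIM (what is proved, stated in full; the proofs are below) =====
def Claim_equal_expanded_length : Prop := ∀ (s : String) (tab_width : Int), Dom_expanded_length s tab_width → Pre_expanded_length s tab_width → Spec_expanded_length s tab_width (expanded_length s tab_width)

-- ===== LEMMAS AND PROOFS =====

-- A's character fold from any starting column equals B's segment fold on the split of the rest.
lemma pvFold_eq_split (tab_width : Int) :
    ∀ (cs : List Char) (col : Int),
      cs.foldl
        (fun col ch =>
          if ch = '\t' then col + (tab_width - PySem.Int.mod col tab_width)
          else col + 1)
        col
      =
      (pvSplitTab cs).2.foldl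
        (fun col seg => col + (tab_width - PySem.Int.mod col tab_width) + (seg.length : Int))
        (col + ((pvSplitTab cs).1.length : Int)) := by
  intro cs
  induction cs with
  | nil => intro col; simp [pvSplitTab]
  | cons c cs ih =>
    intro col
    by_cases hc : c = '\t'
    · subst hc
      simp only [List.foldl_cons, pvSplitTab, ih]
      simp [List.foldl_cons]
    · simp only [List.foldl_cons, if_neg hc, pvSplitTab, ih]
      congr 1
      simp only [List.length_cons]
      push_cast
      omega

-- ===== VERDICT (by name: the statement is the Claim_ definition above) =====
theorem expanded_length_spec : Claim_equal_expanded_length := by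
  intro s tab_width _ _
  unfold Spec_expanded_length expanded_length expanded_length_alt
  have h := pvFold_eq_split tab_width s.toList 0
  simpa using h
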